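-- pv_equiv track=rewrite | github.com/CGATOxford/cgat | scripts/codemls2tsv.py | mapSites2Codons
-- ===== SOURCE A (Python) =====
-- def mapSites2Codons( total_sites, max_per_site ):
--     """map sites to codons and return codons
--     """
--
--     max_per_codon = {}
--     total_codons = set()
--
--     for site in total_sites:
--         codon, pos = divmod( site - 1, 3 )
--         codon += 1
--         total_codons.add( codon )
--         if codon not in max_per_codon:
--             max_per_codon[codon] = 0
--         max_per_codon[codon] = max(max_per_codon[codon], max_per_site[site] )
--
--     return total_codons, max_per_codon
-- ===== SOURCE B (Python) =====
-- def mapSites2Codons(total_sites, max_per_site):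
--     """map sites to codons and return codons
--     """
--     # pass 1: group all per-site maxima by their codon (multimap)
--     groups = {}
--     for site in total_sites:
--         codon = (site - 1) // 3 + 1
--         groups[codon] = groups.get(codon, []) + [max_per_site[site]]
--     # pass 2: reduce each group to its maximum (floored at 0, as counts are)
--     max_per_codon = {}
--     for codon, vals in groups.items():
--         m = 0
--         for v in vals:
--             m = max(m, v)
--         max_per_codon[codon] = m
--     return set(groups), max_per_codon
-- ===== Notes on version B (the rewrite author's own statement) =====
-- stated objective: alternative
-- what changed: Replaced the online running-max dict update with a two-pass group-then-reduce: pass 1 builds a multimap codon -> list of per-site maxima, pass 2 reduces each group to its max; the codon set is the multimap's key set.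
import Mathlib
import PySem

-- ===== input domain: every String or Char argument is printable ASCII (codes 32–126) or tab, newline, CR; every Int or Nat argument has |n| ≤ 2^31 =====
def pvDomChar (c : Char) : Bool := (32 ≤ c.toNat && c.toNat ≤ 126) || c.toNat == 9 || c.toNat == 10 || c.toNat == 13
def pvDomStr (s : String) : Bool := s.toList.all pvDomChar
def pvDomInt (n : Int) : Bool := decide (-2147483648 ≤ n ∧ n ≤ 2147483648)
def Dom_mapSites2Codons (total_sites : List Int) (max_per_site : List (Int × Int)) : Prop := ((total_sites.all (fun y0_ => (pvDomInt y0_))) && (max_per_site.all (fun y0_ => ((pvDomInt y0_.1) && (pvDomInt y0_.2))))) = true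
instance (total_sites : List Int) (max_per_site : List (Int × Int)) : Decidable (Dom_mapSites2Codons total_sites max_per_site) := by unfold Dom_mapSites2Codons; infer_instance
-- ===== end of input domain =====

-- B replaces A's online running-max dict update by a two-pass group-then-reduce (a multimap of
-- per-codon values built first, then a separate reduction pass); return values proved equal on Pre_.

-- ===== PORT A =====
def mapSites2Codons (total_sites : List Int) (max_per_site : List (Int × Int)) : List Int × (List (Int × Int)) :=
  let mps : PySem.Dict Int Int := PySem.Dict.ofList max_per_site
  let st := total_sites.foldl
    (fun (st : PySem.Set Int × PySem.Dict Int Int) site =>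
      let codon := PySem.Int.floordiv (site - 1) 3 + 1   -- divmod(site - 1, 3); pos is unused
      let tc := PySem.Set.add st.1 codon
      let mpc := if st.2.contains codon then st.2 else st.2.insert codon 0
      -- max_per_site[site] raises KeyError when site is not a key — excluded by Pre_; getD is the total form
      let mpc := mpc.insert codon (max (mpc.getD codon 0) (mps.getD site 0))
      (tc, mpc))
    ((PySem.Set.empty : PySem.Set Int), (PySem.Dict.empty : PySem.Dict Int Int))
  (st.1, st.2.items)

-- ===== PORT B =====
def mapSites2Codons_alt (total_sites : List Int) (max_per_site : List (Int × Int)) : List Int × (List (Int × Int)) :=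
  let mps : PySem.Dict Int Int := PySem.Dict.ofList max_per_site
  -- pass 1: group per-site maxima by codon
  let groups : PySem.Dict Int (List Int) := total_sites.foldl
    (fun g site =>
      let codon := PySem.Int.floordiv (site - 1) 3 + 1
      g.insert codon (g.getD codon [] ++ [mps.getD site 0]))
    PySem.Dict.empty
  -- pass 2: reduce each group to its maximum (floored at 0)
  let mpc : PySem.Dict Int Int := groups.items.foldl
    (fun d cv => d.insert cv.1 (cv.2.foldl (fun m v => max m v) 0))
    PySem.Dict.empty
  (PySem.Set.ofList (PySem.Dict.keys groups), mpc.items)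

-- ===== PRECONDITION & SPEC =====
-- Pre_ excludes exactly the inputs on which Python A raises KeyError: a site that is not a key of max_per_site.
def Pre_mapSites2Codons (total_sites : List Int) (max_per_site : List (Int × Int)) : Prop :=
  ∀ s ∈ total_sites, s ∈ max_per_site.map Prod.fst
instance (total_sites : List Int) (max_per_site : List (Int × Int)) : Decidable (Pre_mapSites2Codons total_sites max_per_site) := by unfold Pre_mapSites2Codons; infer_instance
def pvWitness_mapSites2Codons : List Int × (List (Int × Int)) := ([1, 2, 3, 4, 7], [(1, 5), (2, 2), (3, 7), (4, 1), (7, 0)])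

def Spec_mapSites2Codons (total_sites : List Int) (max_per_site : List (Int × Int)) (out : List Int × (List (Int × Int))) : Prop := out = mapSites2Codons_alt total_sites max_per_site
instance (total_sites : List Int) (max_per_site : List (Int × Int)) (out : List Int × (List (Int × Int))) : Decidable (Spec_mapSites2Codons total_sites max_per_site out) := by unfold Spec_mapSites2Codons; infer_instance

-- ===== CLAIM (what is proved, stated in full; the proofs are below) =====
def Claim_equal_mapSites2Codons : Prop := ∀ (total_sites : List Int) (max_per_site : List (Int × Int)), Dom_mapSites2Codons total_sites max_per_site → Pre_mapSites2Codons total_sites max_per_site → Spec_mapSites2Codons total_sites max_per_site (mapSites2Codons total_sites max_per_site)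

-- ===== LEMMAS AND PROOFS =====

def pvRed (vals : List Int) : Int := vals.foldl (fun m v => max m v) 0

def pvMapRed (g : PySem.Dict Int (List Int)) : PySem.Dict Int Int :=
  PySem.Dict.mk (g.items.map (fun cv => (cv.1, pvRed cv.2)))

theorem keys_pvMapRed (g : PySem.Dict Int (List Int)) : (pvMapRed g).keys = g.keys := by
  simp [pvMapRed, PySem.Dict.keys]

theorem contains_pvMapRed (g : PySem.Dict Int (List Int)) (c : Int) :
    (pvMapRed g).contains c = g.contains c := by
  rw [PySem.Dict.contains_eq_decide_mem_keys, PySem.Dict.contains_eq_decide_mem_keys, keys_pvMapRed]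

theorem pvMapRed_insert (g : PySem.Dict Int (List Int)) (c : Int) (w : List Int) :
    pvMapRed (g.insert c w) = (pvMapRed g).insert c (pvRed w) := by
  apply PySem.Dict.ext
  by_cases h : g.contains c = true
  · rw [show (pvMapRed (g.insert c w)).items = (g.insert c w).items.map (fun cv => (cv.1, pvRed cv.2)) from rfl,
      PySem.Dict.items_insert_of_contains _ _ h,
      PySem.Dict.items_insert_of_contains _ _ (by rw [contains_pvMapRed]; exact h)]
    simp only [List.map_map, pvMapRed]
    apply List.map_congr_left
    intro p _
    by_cases hp : p.1 = c <;> simp [hp]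
  · rw [show (pvMapRed (g.insert c w)).items = (g.insert c w).items.map (fun cv => (cv.1, pvRed cv.2)) from rfl,
      PySem.Dict.items_insert_of_not_contains _ _ (by simpa using h),
      PySem.Dict.items_insert_of_not_contains _ _ (by rw [contains_pvMapRed]; simpa using h)]
    simp [pvMapRed]

theorem getD_pvMapRed (g : PySem.Dict Int (List Int)) (c : Int) (h : g.keys.Nodup) :
    (pvMapRed g).getD c 0 = pvRed (g.getD c []) := by
  by_cases hc : g.contains c = true
  · have hs : (g.get? c).isSome = true := by
      rw [← PySem.Dict.contains_eq_isSome_get? g c]; exact hc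
    rcases Option.isSome_iff_exists.mp hs with ⟨xs, hxs⟩
    have hmem := PySem.Dict.mem_items_of_get?_eq_some g hxs
    have hmem' : (c, pvRed xs) ∈ (pvMapRed g).items := by
      have : (fun cv => (cv.1, pvRed cv.2)) (c, xs) ∈ (g.items.map (fun cv => (cv.1, pvRed cv.2))) :=
        List.mem_map_of_mem hmem
      simpa [pvMapRed] using this
    rw [PySem.Dict.getD_of_mem_items _ hmem' (by rw [keys_pvMapRed]; exact h),
      PySem.Dict.getD_of_mem_items _ hmem h]
  · rw [PySem.Dict.getD_of_not_contains _ _ (by rw [contains_pvMapRed]; simpa using hc),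
      PySem.Dict.getD_of_not_contains _ _ (by simpa using hc)]
    rfl

theorem pvRed_append (xs : List Int) (v : Int) : pvRed (xs ++ [v]) = max (pvRed xs) v := by
  simp [pvRed, List.foldl_append]

-- one step of A's dict update on pvMapRed g equals pvMapRed of B's grouping step
theorem step_eq (g : PySem.Dict Int (List Int)) (c v : Int) (h : g.keys.Nodup) :
    (let mpc := if (pvMapRed g).contains c then pvMapRed g else (pvMapRed g).insert c 0
     mpc.insert c (max (mpc.getD c 0) v))
    = pvMapRed (g.insert c (g.getD c [] ++ [v])) := by
  rw [pvMapRed_insert, pvRed_append]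
  by_cases hc : g.contains c = true
  · simp only [contains_pvMapRed, hc, if_pos, getD_pvMapRed g c h]
  · simp only [contains_pvMapRed, hc]
    simp only [Bool.false_eq_true, if_false, PySem.Dict.getD_insert_self, PySem.Dict.insert_insert_self]
    rw [PySem.Dict.getD_of_not_contains _ _ (by simpa using hc)]
    simp [pvRed]

theorem loopA_eq (kf vf : Int → Int) (l : List Int) (g : PySem.Dict Int (List Int)) (h : g.keys.Nodup) :
    l.foldl (fun d site =>
        let mpc := if d.contains (kf site) then d else d.insert (kf site) 0
        mpc.insert (kf site) (max (mpc.getD (kf site) 0) (vf site))) (pvMapRed g)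
    = pvMapRed (l.foldl (fun g site => g.insert (kf site) (g.getD (kf site) [] ++ [vf site])) g) := by
  induction l generalizing g with
  | nil => rfl
  | cons s t ih =>
    simp only [List.foldl_cons]
    rw [step_eq g (kf s) (vf s) h]
    exact ih _ (PySem.Dict.nodup_keys_insert _ _ _ h)

theorem split_pair (ts : List Int) (mpsl : List (Int × Int)) :
    ts.foldl
      (fun (st : PySem.Set Int × PySem.Dict Int Int) site =>
        let codon := PySem.Int.floordiv (site - 1) 3 + 1
        let tc := PySem.Set.add st.1 codon
        let mpc := if st.2.contains codon then st.2 else st.2.insert codon 0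
        let mpc := mpc.insert codon (max (mpc.getD codon 0) ((PySem.Dict.ofList mpsl).getD site 0))
        (tc, mpc))
      ((PySem.Set.empty : PySem.Set Int), (PySem.Dict.empty : PySem.Dict Int Int))
    = (ts.foldl (fun s site => PySem.Set.add s (PySem.Int.floordiv (site - 1) 3 + 1)) PySem.Set.empty,
       ts.foldl (fun d site =>
          let mpc := if d.contains (PySem.Int.floordiv (site - 1) 3 + 1) then d
                     else d.insert (PySem.Int.floordiv (site - 1) 3 + 1) 0
          mpc.insert (PySem.Int.floordiv (site - 1) 3 + 1)
            (max (mpc.getD (PySem.Int.floordiv (site - 1) 3 + 1) 0)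
                 ((PySem.Dict.ofList mpsl).getD site 0))) PySem.Dict.empty) :=
  PySem.List.foldl_prod_mk
    (fun s site => PySem.Set.add s (PySem.Int.floordiv (site - 1) 3 + 1))
    (fun d site =>
      let mpc := if d.contains (PySem.Int.floordiv (site - 1) 3 + 1) then d
                 else d.insert (PySem.Int.floordiv (site - 1) 3 + 1) 0
      mpc.insert (PySem.Int.floordiv (site - 1) 3 + 1)
        (max (mpc.getD (PySem.Int.floordiv (site - 1) 3 + 1) 0)
             ((PySem.Dict.ofList mpsl).getD site 0)))
    ts PySem.Set.empty PySem.Dict.empty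

theorem final (ts : List Int) (mpsl : List (Int × Int)) :
    mapSites2Codons ts mpsl = mapSites2Codons_alt ts mpsl := by
  show ((ts.foldl
      (fun (st : PySem.Set Int × PySem.Dict Int Int) site =>
        let codon := PySem.Int.floordiv (site - 1) 3 + 1
        let tc := PySem.Set.add st.1 codon
        let mpc := if st.2.contains codon then st.2 else st.2.insert codon 0
        let mpc := mpc.insert codon (max (mpc.getD codon 0) ((PySem.Dict.ofList mpsl).getD site 0))
        (tc, mpc))
      ((PySem.Set.empty : PySem.Set Int), (PySem.Dict.empty : PySem.Dict Int Int))).1,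
    (ts.foldl
      (fun (st : PySem.Set Int × PySem.Dict Int Int) site =>
        let codon := PySem.Int.floordiv (site - 1) 3 + 1
        let tc := PySem.Set.add st.1 codon
        let mpc := if st.2.contains codon then st.2 else st.2.insert codon 0
        let mpc := mpc.insert codon (max (mpc.getD codon 0) ((PySem.Dict.ofList mpsl).getD site 0))
        (tc, mpc))
      ((PySem.Set.empty : PySem.Set Int), (PySem.Dict.empty : PySem.Dict Int Int))).2.items)
    = (PySem.Set.ofList (PySem.Dict.keys (ts.foldl
        (fun g site => g.insert (PySem.Int.floordiv (site - 1) 3 + 1)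
          (g.getD (PySem.Int.floordiv (site - 1) 3 + 1) [] ++ [(PySem.Dict.ofList mpsl).getD site 0]))
        (PySem.Dict.empty : PySem.Dict Int (List Int)))),
      ((ts.foldl
        (fun g site => g.insert (PySem.Int.floordiv (site - 1) 3 + 1)
          (g.getD (PySem.Int.floordiv (site - 1) 3 + 1) [] ++ [(PySem.Dict.ofList mpsl).getD site 0]))
        (PySem.Dict.empty : PySem.Dict Int (List Int))).items.foldl
          (fun d cv => d.insert cv.1 (cv.2.foldl (fun m v => max m v) 0))
          (PySem.Dict.empty : PySem.Dict Int Int)).items)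
  rw [split_pair]
  set G := ts.foldl
        (fun g site => g.insert (PySem.Int.floordiv (site - 1) 3 + 1)
          (g.getD (PySem.Int.floordiv (site - 1) 3 + 1) [] ++ [(PySem.Dict.ofList mpsl).getD site 0]))
        (PySem.Dict.empty : PySem.Dict Int (List Int)) with hGdef
  have hkeys : PySem.Dict.keys G = PySem.Set.ofList
      (ts.map (fun site => PySem.Int.floordiv (site - 1) 3 + 1)) := by
    rw [hGdef, PySem.Dict.keys_foldl_insert_key ts
        (fun site => PySem.Int.floordiv (site - 1) 3 + 1)
        (fun g site => g.getD (PySem.Int.floordiv (site - 1) 3 + 1) [] ++ [(PySem.Dict.ofList mpsl).getD site 0]),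
      PySem.Dict.keys_empty, PySem.Set.update_nil_left]
  have hnod : (PySem.Dict.keys G).Nodup := by rw [hkeys]; exact PySem.Set.nodup_ofList _
  rw [Prod.mk.injEq]
  refine ⟨?_, ?_⟩
  · -- set component
    rw [← PySem.Set.update_map_eq_foldl_add ts (fun site => PySem.Int.floordiv (site - 1) 3 + 1) PySem.Set.empty,
      hkeys, PySem.Set.ofList_ofList]
    rfl
  · -- dict component: A's fold is pvMapRed G; B's second pass has the same items
    have hA : ts.foldl (fun d site =>
          let mpc := if d.contains (PySem.Int.floordiv (site - 1) 3 + 1) then d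
                     else d.insert (PySem.Int.floordiv (site - 1) 3 + 1) 0
          mpc.insert (PySem.Int.floordiv (site - 1) 3 + 1)
            (max (mpc.getD (PySem.Int.floordiv (site - 1) 3 + 1) 0)
                 ((PySem.Dict.ofList mpsl).getD site 0))) PySem.Dict.empty
        = pvMapRed G := by
      rw [hGdef]
      exact loopA_eq (fun site => PySem.Int.floordiv (site - 1) 3 + 1)
        (fun site => (PySem.Dict.ofList mpsl).getD site 0) ts PySem.Dict.empty
        PySem.Dict.nodup_keys_empty
    rw [hA]
    rw [PySem.Dict.items_foldl_insert_fresh G.items (fun cv => cv.1)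
        (fun cv => cv.2.foldl (fun m v => max m v) 0) PySem.Dict.empty
        (fun a _ => PySem.Dict.contains_empty a.1) hnod]
    rfl

-- ===== VERDICT (by name: the statement is the Claim_ definition above) =====
theorem mapSites2Codons_spec : Claim_equal_mapSites2Codons := by
  intro ts mps _hd _hp
  exact final ts mps
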